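-- pv_equiv track=rewrite | github.com/luanaamorim04/MC102 | lab06.py | correlacao_cruzada
-- ===== SOURCE A (Python) =====
-- from typing import List
--
-- def correlacao_cruzada(v1: List[int], mask: List[int]) -> List[int]:
--     r: List[int] = []
--     for i in range(len(v1) - len(mask) + 1):
--         soma = 0
--         for j in range(len(mask)):
--             soma += (v1[i + j] * mask[j])
--         r.append(soma)
--     return r
-- ===== SOURCE B (Python) =====
-- def correlacao_cruzada(v1, mask):
--     r = [0] * max(0, len(v1) - len(mask) + 1)
--     for j in range(len(mask)):
--         m = mask[j]
--         for i in range(len(r)):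
--             r[i] += m * v1[i + j]
--     return r
-- ===== Notes on version B (the rewrite author's own statement) =====
-- stated objective: alternative
-- what changed: B interchanges the loops: it pre-allocates the output vector of zeros and scatters each mask coefficient column-wise across the whole result (r[i] += mask[j]*v1[i+j]), instead of A's row-wise dot-product-then-append; exact by commutativity/associativity of integer addition.
import Mathlib
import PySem

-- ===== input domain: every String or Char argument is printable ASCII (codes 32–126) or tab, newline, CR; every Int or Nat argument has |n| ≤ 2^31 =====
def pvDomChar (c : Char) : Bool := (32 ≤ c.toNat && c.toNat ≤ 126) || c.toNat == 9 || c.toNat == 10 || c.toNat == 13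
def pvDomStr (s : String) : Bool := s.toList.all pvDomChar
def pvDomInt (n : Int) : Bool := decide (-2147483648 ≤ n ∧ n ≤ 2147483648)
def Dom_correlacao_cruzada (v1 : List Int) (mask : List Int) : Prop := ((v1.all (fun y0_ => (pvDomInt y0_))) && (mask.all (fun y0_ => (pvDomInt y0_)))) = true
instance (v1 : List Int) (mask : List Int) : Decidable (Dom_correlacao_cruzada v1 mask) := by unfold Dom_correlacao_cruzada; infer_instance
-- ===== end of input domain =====

-- B interchanges the loop nesting (pre-allocated output, column-wise accumulation) instead of
-- A's dot-product-then-append; same return value, exact by commutativity/associativity of Int addition.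

-- ===== PORT A =====
-- Literal port of A. v1[i+j] and mask[j] are ported as pyGetD (default 0): both indices are
-- always in range here (0 ≤ i ≤ len(v1)-len(mask), 0 ≤ j < len(mask)), so this is exact.
def correlacao_cruzada (v1 : List Int) (mask : List Int) : List Int :=
  (PySem.List.pyRange 0 ((v1.length : Int) - (mask.length : Int) + 1) 1).foldl
    (fun r i =>
      r ++ [(PySem.List.pyRange 0 (mask.length : Int) 1).foldl
              (fun soma j => soma + PySem.List.pyGetD v1 (i + j) 0 * PySem.List.pyGetD mask j 0) 0])
    []

-- ===== PORT B =====
-- Literal port of Source B: r = [0]*max(0, len(v1)-len(mask)+1); for j: for i: r[i] += mask[j]*v1[i+j].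
-- The in-place i-loop over all of r becomes List.mapIdx; indices are in range, so pyGetD is exact.
def correlacao_cruzada_alt (v1 : List Int) (mask : List Int) : List Int :=
  (PySem.List.pyRange 0 (mask.length : Int) 1).foldl
    (fun r j =>
      let m := PySem.List.pyGetD mask j 0
      r.mapIdx (fun i x => x + m * PySem.List.pyGetD v1 ((i : Int) + j) 0))
    (List.replicate (max 0 ((v1.length : Int) - (mask.length : Int) + 1)).toNat 0)

-- ===== PRECONDITION & SPEC =====
def Spec_correlacao_cruzada (v1 : List Int) (mask : List Int) (out : List Int) : Prop := out = correlacao_cruzada_alt v1 mask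
instance (v1 : List Int) (mask : List Int) (out : List Int) : Decidable (Spec_correlacao_cruzada v1 mask out) := by unfold Spec_correlacao_cruzada; infer_instance

-- ===== CLAIM (what is proved, stated in full; the proofs are below) =====
def Claim_equal_correlacao_cruzada : Prop := ∀ (v1 : List Int) (mask : List Int), Dom_correlacao_cruzada v1 mask → Spec_correlacao_cruzada v1 mask (correlacao_cruzada v1 mask)

-- ===== LEMMAS AND PROOFS =====

-- B's outer loop: scattering each column j onto r accumulates, per position i, the sum over j.
theorem foldl_mapIdx_add (js : List Int) (f : Nat → Int → Int) (r : List Int) :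
    js.foldl (fun r j => r.mapIdx (fun i x => x + f i j)) r
      = r.mapIdx (fun i x => x + (js.map (f i)).sum) := by
  induction js generalizing r with
  | nil =>
    simp only [List.foldl_nil, List.map_nil, List.sum_nil, add_zero]
    apply List.ext_getElem <;> simp
  | cons j js ih =>
    simp only [List.foldl_cons, ih, List.mapIdx_mapIdx, List.map_cons, List.sum_cons]
    apply List.ext_getElem <;> simp

theorem mapIdx_replicate (n : Nat) (c : Int) (f : Nat → Int → Int) :
    (List.replicate n c).mapIdx f = (List.range n).map (fun i => f i c) := by
  apply List.ext_getElem <;> simp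

-- ===== VERDICT (by name: the statement is the Claim_ definition above) =====
theorem correlacao_cruzada_spec : Claim_equal_correlacao_cruzada := by
  intro v1 mask _
  show correlacao_cruzada v1 mask = correlacao_cruzada_alt v1 mask
  unfold correlacao_cruzada correlacao_cruzada_alt
  rw [PySem.List.foldl_append_singleton_eq_map, foldl_mapIdx_add, mapIdx_replicate,
      PySem.List.pyRange_one 0 ((v1.length : Int) - (mask.length : Int) + 1)]
  have hmax : (max 0 ((v1.length : Int) - (mask.length : Int) + 1)).toNat
      = (((v1.length : Int) - (mask.length : Int) + 1) - 0).toNat := by omega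
  rw [hmax, List.map_map, List.nil_append]
  refine List.map_congr_left (fun i _ => ?_)
  simp only [Function.comp_apply, PySem.List.foldl_add, zero_add]
  exact congrArg List.sum (List.map_congr_left (fun j _ => by ring))
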